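-- pv_equiv track=rewrite | github.com/idotal/polarcub | BinaryTrellis.py | trimZerosAtEdges
-- ===== SOURCE A (Python) =====
-- def trimZerosAtEdges(receivedWord):
--         trimmedReceivedWord = []
--
--         firstOneIndex = -1
--
--         for i in range(len(receivedWord)):
--             if receivedWord[i] == 1:
--                 firstOneIndex = i
--                 break
--
--         if firstOneIndex == -1:
--             return trimmedReceivedWord # which is empty
--
--         lastOneIndex = -1
--         for i in range(len(receivedWord)-1,-1,-1):
--             if receivedWord[i] == 1:
--                 lastOneIndex = i
--                 break
--
--         assert(lastOneIndex != -1)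
--
--         for i in range(firstOneIndex, lastOneIndex+1):
--             trimmedReceivedWord.append(receivedWord[i])
--
--         return trimmedReceivedWord
-- ===== SOURCE B (Python) =====
-- def trimZerosAtEdges(receivedWord):
--     ones = [i for i, x in enumerate(receivedWord) if x == 1]
--     if not ones:
--         return []
--     return list(receivedWord[ones[0]:ones[-1] + 1])
-- ===== Notes on version B (the rewrite author's own statement) =====
-- stated objective: simpler
-- what changed: B collects the indices of all 1-entries in one enumerate pass and returns a single slice from the first to the last such index, replacing A's forward scan, backward scan and element-by-element append loop.
import Mathlib
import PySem

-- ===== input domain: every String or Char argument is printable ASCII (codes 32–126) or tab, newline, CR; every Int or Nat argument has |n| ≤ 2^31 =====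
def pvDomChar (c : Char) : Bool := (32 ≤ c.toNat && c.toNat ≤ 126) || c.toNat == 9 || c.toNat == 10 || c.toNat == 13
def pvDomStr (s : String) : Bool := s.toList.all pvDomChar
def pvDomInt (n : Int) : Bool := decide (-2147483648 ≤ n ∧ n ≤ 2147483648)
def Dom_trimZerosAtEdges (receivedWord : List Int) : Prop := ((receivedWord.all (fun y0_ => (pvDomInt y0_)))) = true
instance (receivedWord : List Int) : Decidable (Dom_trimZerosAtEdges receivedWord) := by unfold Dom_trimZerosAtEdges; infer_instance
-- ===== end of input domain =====

-- B trims the received word to one slice between the first and last 1-index found in a single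
-- enumerate pass, instead of A's forward scan, backward scan and append loop (objective: simpler).

-- ===== PORT A =====
-- 'for i in range(len(receivedWord)): if receivedWord[i] == 1: firstOneIndex = i; break'
def pvFirstOneLoop (rw : List Int) (i : Nat) : Int :=
  if i < rw.length then
    if rw.getD i 0 = 1 then (i : Int) else pvFirstOneLoop rw (i + 1)
  else -1
termination_by rw.length - i

-- 'for i in range(len(receivedWord)-1,-1,-1): …' — scans indices n-1, n-2, …, 0
def pvLastOneLoop (rw : List Int) : Nat → Int
  | 0 => -1
  | n + 1 => if rw.getD n 0 = 1 then (n : Int) else pvLastOneLoop rw n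

def trimZerosAtEdges (receivedWord : List Int) : List Int :=
  let firstOneIndex := pvFirstOneLoop receivedWord 0
  if firstOneIndex = -1 then []
  else
    let lastOneIndex := pvLastOneLoop receivedWord receivedWord.length
    (PySem.List.pyRange firstOneIndex (lastOneIndex + 1)).foldl
      (fun acc i => acc ++ [PySem.List.pyGetD receivedWord i 0]) []

-- ===== PORT B =====
def trimZerosAtEdges_alt (receivedWord : List Int) : List Int :=
  let ones := ((PySem.List.enumerate receivedWord).filter (fun p => p.2 == 1)).map Prod.fst
  match ones with
  | [] => []
  | f :: rest =>
      PySem.List.slice receivedWord (some f)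
        (some ((f :: rest).getLastD 0 + 1))

-- ===== PRECONDITION & SPEC =====
def Spec_trimZerosAtEdges (receivedWord : List Int) (out : List Int) : Prop := out = trimZerosAtEdges_alt receivedWord
instance (receivedWord : List Int) (out : List Int) : Decidable (Spec_trimZerosAtEdges receivedWord out) := by unfold Spec_trimZerosAtEdges; infer_instance

-- ===== CLAIM (what is proved, stated in full; the proofs are below) =====
def Claim_equal_trimZerosAtEdges : Prop := ∀ (receivedWord : List Int), Dom_trimZerosAtEdges receivedWord → Spec_trimZerosAtEdges receivedWord (trimZerosAtEdges receivedWord)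

-- ===== LEMMAS AND PROOFS =====

-- the Nat indices of the 1-entries, in increasing order
def pvOnesN (rw : List Int) : List Nat :=
  (List.range rw.length).filter (fun j => rw.getD j 0 == 1)

lemma pvOnesN_cons (x : Int) (t : List Int) :
    pvOnesN (x :: t) = (if x == 1 then [0] else []) ++ (pvOnesN t).map (· + 1) := by
  by_cases hx : x = 1 <;>
    simp [pvOnesN, List.range_succ_eq_map, List.filter_map, Function.comp_def, hx,
      Nat.succ_eq_add_one]

lemma pvEnum_ones (rw : List Int) (s : Int) :
    ((PySem.List.enumerate rw s).filter (fun p => p.2 == 1)).map Prod.fst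
      = (pvOnesN rw).map (fun (j : Nat) => s + (j : Int)) := by
  induction rw generalizing s with
  | nil => simp [PySem.List.enumerate, pvOnesN]
  | cons x t ih =>
      rw [pvOnesN_cons,
        show PySem.List.enumerate (x :: t) s = (s, x) :: PySem.List.enumerate t (s + 1) from rfl,
        List.filter_cons]
      by_cases hx : x = 1
      · rw [if_pos (by simpa using hx), List.map_cons, ih (s + 1)]
        simp only [hx, beq_self_eq_true, if_true, List.singleton_append, List.map_cons,
          List.map_map, Nat.cast_zero, add_zero]
        refine congrArg (s :: ·) ?_
        exact List.map_congr_left fun j _ => by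
          simp only [Function.comp_apply]
          push_cast
          ring
      · rw [if_neg (by simpa using hx), ih (s + 1)]
        simp only [hx, beq_iff_eq, if_false, List.nil_append, List.map_map]
        exact List.map_congr_left fun j _ => by
          simp only [Function.comp_apply]
          push_cast
          ring

lemma pvFirstOneLoop_eq (rw : List Int) :
    ∀ n i, n = rw.length - i →
      pvFirstOneLoop rw i
        = (((List.range' i (rw.length - i)).filter (fun j => rw.getD j 0 == 1)).head?).elim
            (-1) (fun (j : Nat) => (j : Int)) := by
  intro n
  induction n with
  | zero =>
      intro i h
      have hle : rw.length ≤ i := by omega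
      rw [pvFirstOneLoop]
      simp [Nat.not_lt.mpr hle, show rw.length - i = 0 by omega]
  | succ n ih =>
      intro i h
      have hlt : i < rw.length := by omega
      have hr : rw.length - i = (rw.length - (i + 1)) + 1 := by omega
      rw [pvFirstOneLoop, if_pos hlt, hr, List.range'_succ, List.filter_cons]
      by_cases hx : rw.getD i 0 = 1
      · rw [if_pos hx, if_pos (by simpa using hx), List.head?_cons, Option.elim_some]
      · rw [if_neg hx, if_neg (by simpa using hx)]
        exact ih (i + 1) (by omega)

lemma pvLastOneLoop_eq (rw : List Int) :
    ∀ n, pvLastOneLoop rw n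
        = (((List.range n).filter (fun j => rw.getD j 0 == 1)).getLast?).elim
            (-1) (fun (j : Nat) => (j : Int)) := by
  intro n
  induction n with
  | zero => simp [pvLastOneLoop]
  | succ n ih =>
      rw [show pvLastOneLoop rw (n + 1)
            = if rw.getD n 0 = 1 then (n : Int) else pvLastOneLoop rw n from rfl,
        List.range_succ, List.filter_append, List.filter_cons, List.filter_nil]
      by_cases hx : rw.getD n 0 = 1
      · rw [if_pos hx, if_pos (by simpa using hx), List.getLast?_concat, Option.elim_some]
      · rw [if_neg hx, if_neg (by simpa using hx), List.append_nil]
        exact ih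

lemma pvOnesN_pairwise (rw : List Int) : (pvOnesN rw).Pairwise (· < ·) :=
  (List.pairwise_lt_range).filter _

lemma pvOnesN_lt_length {rw : List Int} {j : Nat} (h : j ∈ pvOnesN rw) : j < rw.length := by
  have := (List.mem_filter.mp h).1
  simpa using this

lemma pvRange_map (a b : Nat) (hab : a ≤ b) :
    PySem.List.pyRange (a : Int) (b : Int) = (List.range' a (b - a)).map (fun (k : Nat) => (k : Int)) := by
  induction b with
  | zero =>
      have : a = 0 := by omega
      subst this
      simp [PySem.List.pyRange]
  | succ b ih =>
      by_cases h : a ≤ b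
      · rw [show ((b + 1 : Nat) : Int) = (b : Int) + 1 by push_cast; ring,
          PySem.List.pyRange_one_succ_right (by exact_mod_cast h), ih h,
          show b + 1 - a = (b - a) + 1 by omega, List.range'_1_concat,
          show a + (b - a) = b from by omega, List.map_append, List.map_cons, List.map_nil]
      · have ha : a = b + 1 := by omega
        subst ha
        rw [show b + 1 - (b + 1) = 0 from by omega]
        simp [PySem.List.pyRange]

lemma pvSliceChar (rw : List Int) (a b : Nat) (hab : a ≤ b) (hb : b ≤ rw.length) :
    (List.range' a (b - a)).map (fun j => rw.getD j 0) = List.take (b - a) (List.drop a rw) := by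
  apply List.ext_getElem
  · simp; omega
  · intro k h1 h2
    simp only [List.length_map, List.length_range'] at h1
    simp only [List.getElem_map, List.getElem_range', one_mul, List.getElem_take,
      List.getElem_drop]
    rw [List.getD_eq_getElem _ _ (by omega)]

lemma pvHead_le_getLast (f : Nat) (rest : List Nat) (hp : (f :: rest).Pairwise (· < ·)) :
    f ≤ (f :: rest).getLast (List.cons_ne_nil f rest) := by
  cases rest with
  | nil => simp
  | cons y ys =>
      have hmem : (f :: y :: ys).getLast (List.cons_ne_nil _ _) ∈ y :: ys := by
        rw [List.getLast_cons (List.cons_ne_nil _ _)]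
        exact List.getLast_mem _
      have := (List.pairwise_cons.mp hp).1 _ hmem
      omega

-- ===== VERDICT (by name: the statement is the Claim_ definition above) =====
theorem trimZerosAtEdges_spec : Claim_equal_trimZerosAtEdges := by
  intro rw _
  unfold Spec_trimZerosAtEdges
  simp only [trimZerosAtEdges, trimZerosAtEdges_alt]
  have hones : ((PySem.List.enumerate rw 0).filter (fun p => p.2 == 1)).map Prod.fst
      = (pvOnesN rw).map (fun (j : Nat) => (j : Int)) := by
    rw [pvEnum_ones]; simp
  have hfirst := pvFirstOneLoop_eq rw (rw.length - 0) 0 rfl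
  have hlast := pvLastOneLoop_eq rw rw.length
  rw [List.range_eq_range'] at hlast
  simp only [Nat.sub_zero] at hfirst
  cases hcase : pvOnesN rw with
  | nil =>
      have hcase' : (List.range' 0 rw.length).filter (fun j => rw.getD j 0 == 1) = [] := by
        simpa [pvOnesN, List.range_eq_range'] using hcase
      rw [hones, hcase, hfirst, hcase']
      simp
  | cons f rest =>
      have hcase' : (List.range' 0 rw.length).filter (fun j => rw.getD j 0 == 1) = f :: rest := by
        simpa [pvOnesN, List.range_eq_range'] using hcase
      rw [hones, hcase]
      set lN := (f :: rest).getLast (List.cons_ne_nil f rest) with hlN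
      have hfl : f ≤ lN := pvHead_le_getLast f rest (hcase ▸ pvOnesN_pairwise rw)
      have hlmem : lN ∈ pvOnesN rw := by rw [hcase]; exact List.getLast_mem _
      have hllen : lN < rw.length := pvOnesN_lt_length hlmem
      have hgl : ((f :: rest).getLast?).elim (-1 : Int) (fun (j : Nat) => (j : Int)) = (lN : Int) := by
        rw [List.getLast?_eq_some_getLast (List.cons_ne_nil f rest)]
        rfl
      rw [hfirst, hcase', hlast, hcase', hgl]
      simp only [List.head?_cons, Option.elim_some]
      have hfne : ¬ ((f : Int) = -1) := by omega
      rw [if_neg hfne, List.map_cons]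
      have hlast2 : (((f : Int) :: rest.map (fun (j : Nat) => (j : Int))).getLastD 0) = (lN : Int) := by
        rw [show ((f : Int) :: rest.map (fun (j : Nat) => (j : Int)))
              = (f :: rest).map (fun (j : Nat) => (j : Int)) from rfl,
          List.getLastD_eq_getLast?, List.getLast?_map,
          List.getLast?_eq_some_getLast (List.cons_ne_nil f rest)]
        rfl
      show _ = PySem.List.slice rw (some ((f : Int)))
        (some ((((f : Int)) :: rest.map (fun (j : Nat) => (j : Int))).getLastD 0 + 1))
      rw [hlast2, PySem.List.foldl_append_singleton_eq_map, List.nil_append,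
        show ((lN : Int) + 1) = ((lN + 1 : Nat) : Int) by push_cast; ring,
        pvRange_map f (lN + 1) (by omega), List.map_map, PySem.List.slice_natCast,
        ← pvSliceChar rw f (lN + 1) (by omega) (by omega)]
      exact List.map_congr_left fun j _ => by
        simp [Function.comp, PySem.List.pyGetD_natCast]
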